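-- pv_equiv track=rewrite | github.com/doctorcotton/wewe-rss-2feishu | python-scripts/wewerss_runner.py | process_markdown_content
-- ===== SOURCE A (Python) =====
-- def process_markdown_content(content):
--     """处理Markdown内容，确保标题层级规范"""
--     lines = content.split('\n')
--     processed_lines = []
--
--     for i, line in enumerate(lines):
--         # 处理标题后直接跟着加粗内容的情况
--         if line.startswith('###') and i + 1 < len(lines) and lines[i+1].startswith('**'):
--             # 将标题和加粗内容分开
--             processed_lines.append(line)
--             processed_lines.append('')  # 添加空行
--         else:
--             processed_lines.append(line)
--
--     return '\n'.join(processed_lines)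
-- ===== SOURCE B (Python) =====
-- def process_markdown_content(content):
--     """处理Markdown内容，确保标题层级规范"""
--     # Scan the raw string with find(); never builds a line list.
--     res = []
--     start = 0
--     while True:
--         j = content.find('\n', start)
--         if j == -1:
--             res.append(content[start:])
--             return ''.join(res)
--         res.append(content[start:j + 1])
--         if content.startswith('###', start) and content.startswith('**', j + 1):
--             res.append('\n')
--         start = j + 1
-- ===== Notes on version B (the rewrite author's own statement) =====
-- stated objective: alternative
-- what changed: B never splits the content into a line list: it scans the raw string with str.find for newline positions, copying each line slice into the output and inserting one extra '\n' after a '###' line followed by a '**' line; no enumerate, no list of lines, no '\n'.join.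
import Mathlib
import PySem

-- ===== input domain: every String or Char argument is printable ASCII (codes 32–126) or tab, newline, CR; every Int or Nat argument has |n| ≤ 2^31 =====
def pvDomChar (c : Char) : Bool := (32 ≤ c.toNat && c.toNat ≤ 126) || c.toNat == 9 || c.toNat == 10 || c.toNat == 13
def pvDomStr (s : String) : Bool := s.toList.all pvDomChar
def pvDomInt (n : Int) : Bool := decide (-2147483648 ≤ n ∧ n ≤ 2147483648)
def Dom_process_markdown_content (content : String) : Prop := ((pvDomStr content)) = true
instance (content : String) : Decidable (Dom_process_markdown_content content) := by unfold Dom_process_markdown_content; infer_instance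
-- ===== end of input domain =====

-- B scans the raw string with find('\n', start) and inserts the extra newline in place,
-- never building a line list (alternative decomposition; same cost).

-- ===== PORT A =====
def process_markdown_content (content : String) : String :=
  let lines := (PySem.Str.split? content "\n").getD []   -- split? is none only for sep = ""; sep here is "\n"
  let processed := (PySem.List.enumerate lines).foldl (fun acc p =>
    if PySem.Str.startswith p.2 "###" && decide (p.1 + 1 < (lines.length : Int)) &&
       PySem.Str.startswith (PySem.List.pyGetD lines (p.1 + 1) "") "**"
    then acc ++ [p.2, ""]
    else acc ++ [p.2]) []
  PySem.Str.join "\n" processed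

-- ===== PORT B =====
-- content.find('\n', start): exact via PySem.Chars.findFrom (start is always 0 ≤ start ≤ len here).
-- This out-of-bounds fact is cited by pvGo's decreasing_by, so it lives above the port.
theorem pvFindFrom_oob (cs : List Char) (start : Nat) (h : cs.length < start) :
    PySem.Chars.findFrom cs ['\n'] (start : Int) none = -1 := by
  simp only [PySem.Chars.findFrom]
  have : ((cs.length : Int)) < (start : Int) := by exact_mod_cast h
  split_ifs with h1 <;> omega

theorem pvFindFrom_bounds (cs : List Char) (start : Nat)
    (h : PySem.Chars.findFrom cs ['\n'] (start : Int) none ≠ -1) :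
    (start : Int) ≤ PySem.Chars.findFrom cs ['\n'] (start : Int) none ∧
      (PySem.Chars.findFrom cs ['\n'] (start : Int) none).toNat < cs.length := by
  have hle : start ≤ cs.length := by
    by_contra hgt
    exact h (pvFindFrom_oob cs start (by omega))
  obtain ⟨h1, h2, _⟩ := PySem.Chars.findFrom_natCast_spec cs ['\n'] start hle h
  refine ⟨h1, ?_⟩
  by_contra hge
  rw [List.drop_eq_nil_of_le (by omega)] at h2
  simp at h2

-- content.startswith(p, k) for 0 ≤ k ≤ len content is exactly p.isPrefixOf (content[k:]).
def pvGo (cs : List Char) (start : Nat) (res : List Char) : List Char :=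
  let j := PySem.Chars.findFrom cs ['\n'] (start : Int) none
  if _h : j = -1 then res ++ PySem.List.slice cs (some (start : Int)) none   -- content[start:]
  else
    let res1 := res ++ PySem.List.slice cs (some (start : Int)) (some (j + 1))  -- content[start:j+1]
    let res2 := if PySem.Chars.startswith (cs.drop start) ['#','#','#']
                  && PySem.Chars.startswith (cs.drop (j + 1).toNat) ['*','*']
                then res1 ++ ['\n'] else res1
    pvGo cs (j + 1).toNat res2
termination_by cs.length - start
decreasing_by
  obtain ⟨h1, h2⟩ := pvFindFrom_bounds cs start _h
  omega

def process_markdown_content_alt (content : String) : String :=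
  String.ofList (pvGo content.toList 0 [])

-- ===== PRECONDITION & SPEC =====
def Spec_process_markdown_content (content : String) (out : String) : Prop := out = process_markdown_content_alt content
instance (content : String) (out : String) : Decidable (Spec_process_markdown_content content out) := by unfold Spec_process_markdown_content; infer_instance

-- ===== CLAIM =====
def Claim_equal_process_markdown_content : Prop := ∀ (content : String), Dom_process_markdown_content content → Spec_process_markdown_content content (process_markdown_content content)

-- ===== LEMMAS AND PROOFS =====

/-- The processed line list A's loop produces, characterised structurally. -/
def pvRec : List String → List String
  | [] => []
  | [x] => [x]
  | x :: y :: rs =>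
    (if PySem.Str.startswith x "###" && PySem.Str.startswith y "**" then [x, ""] else [x])
      ++ pvRec (y :: rs)

/-- Char-level mirror of pvRec. -/
def pvRecC : List (List Char) → List (List Char)
  | [] => []
  | [x] => [x]
  | x :: y :: rs =>
    (if PySem.Chars.startswith x ['#','#','#'] && PySem.Chars.startswith y ['*','*']
     then [x, []] else [x]) ++ pvRecC (y :: rs)

theorem pvLemA (rest full : List String) (k : Nat) (acc : List String)
    (h : full.drop k = rest) :
    (PySem.List.enumerate rest (k : Int)).foldl (fun acc p =>
      if PySem.Str.startswith p.2 "###" && decide (p.1 + 1 < (full.length : Int)) &&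
         PySem.Str.startswith (PySem.List.pyGetD full (p.1 + 1) "") "**"
      then acc ++ [p.2, ""]
      else acc ++ [p.2]) acc = acc ++ pvRec rest := by
  induction rest generalizing k acc with
  | nil => simp [PySem.List.enumerate, pvRec]
  | cons x rest ih =>
    have hlen : full.length = k + 1 + rest.length := by
      have h1 := congrArg List.length h
      simp [List.length_drop] at h1
      have hk : k < full.length := by
        by_contra hk
        rw [List.drop_eq_nil_of_le (by omega)] at h
        exact (List.cons_ne_nil x rest) h.symm
      omega
    have hdrop : full.drop (k + 1) = rest := by
      have h2 : full.drop (k + 1) = (full.drop k).drop 1 := by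
        rw [List.drop_drop]
      rw [h2, h]; rfl
    rw [PySem.List.enumerate_cons, List.foldl_cons]
    cases rest with
    | nil =>
      have hc : decide ((k : Int) + 1 < (full.length : Int)) = false := by
        simp only [List.length_nil] at hlen
        simp; omega
      simp [hc, pvRec, PySem.List.enumerate]
    | cons y rs =>
      have hget : PySem.List.pyGetD full ((k : Int) + 1) "" = y := by
        have hcast : ((k : Int) + 1) = ((k + 1 : Nat) : Int) := by push_cast; ring
        rw [hcast, PySem.List.pyGetD_natCast]
        have h3 : full.getD (k + 1) "" = (full.drop (k + 1)).getD 0 "" := by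
          simp [List.getD, List.getElem?_drop]
        rw [h3, hdrop]; rfl
      have hlt : decide ((k : Int) + 1 < (full.length : Int)) = true := by
        simp only [List.length_cons] at hlen
        simp; omega
      have hstep := ih (k + 1)
        (if PySem.Str.startswith x "###" && decide ((k : Int) + 1 < (full.length : Int)) &&
            PySem.Str.startswith (PySem.List.pyGetD full ((k : Int) + 1) "") "**"
         then acc ++ [x, ""] else acc ++ [x]) hdrop
      have hcast : ((k + 1 : Nat) : Int) = ((k : Int) + 1) := by push_cast; ring
      rw [hcast] at hstep
      rw [hstep, hget, hlt]
      simp only [pvRec, Bool.and_true]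
      cases hcond : (PySem.Str.startswith x "###" && PySem.Str.startswith y "**") <;>
        simp [List.append_assoc]

theorem pvRec_map (ls : List String) :
    (pvRec ls).map String.toList = pvRecC (ls.map String.toList) := by
  induction ls with
  | nil => rfl
  | cons x tl ih =>
    cases tl with
    | nil => rfl
    | cons y rs =>
      simp only [pvRec, pvRecC, List.map_cons]
      have hx : PySem.Str.startswith x "###" = PySem.Chars.startswith x.toList ['#','#','#'] := by
        rw [PySem.Str.startswith_eq]; rfl
      have hy : PySem.Str.startswith y "**" = PySem.Chars.startswith y.toList ['*','*'] := by
        rw [PySem.Str.startswith_eq]; rfl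
      rw [hx, hy] at *
      cases hcond : (PySem.Chars.startswith x.toList ['#','#','#'] && PySem.Chars.startswith y.toList ['*','*']) <;>
        simp [ih]

theorem pvRecC_ne_nil (ls : List (List Char)) (h : ls ≠ []) : pvRecC ls ≠ [] := by
  cases ls with
  | nil => exact absurd rfl h
  | cons x tl =>
    cases tl with
    | nil => simp [pvRecC]
    | cons y rs =>
      simp only [pvRecC]
      cases hcond : (PySem.Chars.startswith x ['#','#','#'] && PySem.Chars.startswith y ['*','*']) <;> simp

theorem pvInter_single (a : List Char) : ['\n'].intercalate [a] = a := by
  simp [List.intercalate, List.intersperse]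

theorem pvInter_cons (a : List Char) (l : List (List Char)) (h : l ≠ []) :
    ['\n'].intercalate (a :: l) = a ++ '\n' :: ['\n'].intercalate l := by
  cases l with
  | nil => exact absurd rfl h
  | cons b bs => simp [List.intercalate, List.intersperse]

/-- [c] is an infix iff c is a member. -/
theorem pvSingleton_infix (c : Char) (l : List Char) : [c] <:+: l ↔ c ∈ l := by
  constructor
  · intro h; exact h.subset (List.mem_singleton_self c)
  · intro h
    obtain ⟨s, t, rfl⟩ := List.append_of_mem h
    exact ⟨s, t, by simp⟩

theorem pvSingleton_prefix (c : Char) (l : List Char) : [c] <+: l ↔ l.head? = some c := by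
  cases l with
  | nil => simp
  | cons a tl => simp [List.cons_prefix_cons, eq_comm]

theorem pvFindFrom_none (cs : List Char) (start : Nat) (h : '\n' ∉ cs.drop start) :
    PySem.Chars.findFrom cs ['\n'] (start : Int) none = -1 := by
  by_cases hle : start ≤ cs.length
  · rw [PySem.Chars.findFrom_natCast_eq_neg_one_iff cs ['\n'] start hle]
    rw [pvSingleton_infix]; exact h
  · exact pvFindFrom_oob cs start (by omega)

theorem pvFind_pos (x b : List Char) (hx : '\n' ∉ x) :
    PySem.Chars.find (x ++ '\n' :: b) ['\n'] = (x.length : Int) := by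
  set s := x ++ '\n' :: b with hs
  have hne : PySem.Chars.find s ['\n'] ≠ -1 := by
    rw [Ne, PySem.Chars.find_eq_neg_one_iff, pvSingleton_infix]
    simp [hs]
  have hzero : PySem.Chars.findFrom s ['\n'] ((0 : Nat) : Int) none = PySem.Chars.find s ['\n'] := by
    simp [PySem.Chars.findFrom_zero s ['\n']]
  have hspec := PySem.Chars.findFrom_natCast_spec s ['\n'] 0 (Nat.zero_le _) (by rw [hzero]; exact hne)
  rw [hzero] at hspec
  obtain ⟨h0, hpre, hmin⟩ := hspec
  set m := (PySem.Chars.find s ['\n']).toNat with hm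
  have hub : m ≤ x.length := by
    by_contra hgt
    exact hmin x.length (Nat.zero_le _) (by omega) (by simp [hs])
  have heq : m = x.length := by
    by_contra hne2
    have hlt : m < x.length := by omega
    have : (s.drop m).head? = some '\n' := (pvSingleton_prefix _ _).mp hpre
    rw [List.head?_drop] at this
    have : s[m]? = some '\n' := this
    rw [hs, List.getElem?_append_left hlt] at this
    exact hx (List.mem_of_getElem? this)
  have : PySem.Chars.find s ['\n'] = (m : Int) := by omega
  rw [this, heq]

theorem pvFindFrom_pos (cs : List Char) (start : Nat) (x b : List Char) (hx : '\n' ∉ x)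
    (h : cs.drop start = x ++ '\n' :: b) :
    PySem.Chars.findFrom cs ['\n'] (start : Int) none = (start : Int) + x.length := by
  have hlt : start < cs.length := by
    by_contra hge
    rw [List.drop_eq_nil_of_le (by omega)] at h
    exact (List.append_ne_nil_of_right_ne_nil x (by simp)) h.symm
  rw [PySem.Chars.findFrom_natCast cs ['\n'] start (by omega), h, pvFind_pos x b hx]
  have : ((x.length : Int)) ≠ -1 := by omega
  simp [this]

theorem pvPrefix_cut (pre x b : List Char) (hpre : '\n' ∉ pre) :
    pre.isPrefixOf (x ++ '\n' :: b) = pre.isPrefixOf x := by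
  induction pre generalizing x with
  | nil => simp [List.isPrefixOf]
  | cons p ps ih =>
    cases x with
    | nil =>
      have hp : p ≠ '\n' := fun hc => hpre (by simp [hc])
      simp [List.isPrefixOf, hp]
    | cons q xs =>
      simp only [List.cons_append, List.isPrefixOf]
      rw [ih xs (fun hm => hpre (List.mem_cons_of_mem _ hm))]

theorem pvGo_spec (ls : List (List Char)) (cs : List Char) (start : Nat) (res : List Char)
    (hnn : ∀ x ∈ ls, '\n' ∉ x) (hne : ls ≠ [])
    (hdrop : cs.drop start = ['\n'].intercalate ls) :
    pvGo cs start res = res ++ ['\n'].intercalate (pvRecC ls) := by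
  induction ls generalizing start res with
  | nil => exact absurd rfl hne
  | cons x tl ih =>
    cases tl with
    | nil =>
      rw [pvInter_single] at hdrop
      rw [pvGo]
      have hfind := pvFindFrom_none cs start (by rw [hdrop]; exact hnn x (by simp))
      simp only [hfind, dite_true]
      rw [PySem.List.slice_from cs (by positivity), Int.toNat_natCast, hdrop]
      rw [show pvRecC [x] = [x] from rfl, pvInter_single]
    | cons y rs =>
      have hx : '\n' ∉ x := hnn x (by simp)
      have hy : '\n' ∉ y := hnn y (by simp)
      have htl : (y :: rs) ≠ [] := by simp
      rw [pvInter_cons x (y :: rs) htl] at hdrop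
      have hfind := pvFindFrom_pos cs start x (['\n'].intercalate (y :: rs)) hx hdrop
      rw [pvGo]
      simp only [hfind]
      have hnm1 : ((start : Int) + x.length) ≠ -1 := by omega
      rw [dif_neg hnm1]
      have hfin : ((start : Int) + ↑x.length + 1) = ((start + x.length + 1 : Nat) : Int) := by push_cast; ring
      have hdrop2 : cs.drop (start + x.length + 1) = ['\n'].intercalate (y :: rs) := by
        have : cs.drop (start + x.length + 1) = (cs.drop start).drop (x.length + 1) := by
          rw [List.drop_drop]; ring_nf
        rw [this, hdrop]
        simp
      have hslice : PySem.List.slice cs (some (start : Int)) (some ((start : Int) + x.length + 1))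
          = x ++ ['\n'] := by
        rw [hfin, PySem.List.slice_natCast]
        have h4 : start + x.length + 1 - start = x.length + 1 := by omega
        rw [h4, hdrop]
        rw [show x ++ '\n' :: ['\n'].intercalate (y :: rs)
              = (x ++ ['\n']) ++ ['\n'].intercalate (y :: rs) from by simp]
        rw [List.take_append_of_le_length (by simp), List.take_of_length_le (by simp)]
      have hcond : (PySem.Chars.startswith (cs.drop start) ['#','#','#']
            && PySem.Chars.startswith (cs.drop ((start : Int) + ↑x.length + 1).toNat) ['*','*'])
          = (PySem.Chars.startswith x ['#','#','#'] && PySem.Chars.startswith y ['*','*']) := by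
        have h1 : PySem.Chars.startswith (cs.drop start) ['#','#','#']
            = PySem.Chars.startswith x ['#','#','#'] := by
          rw [hdrop]; exact pvPrefix_cut ['#','#','#'] x _ (by decide)
        have htn : ((start : Int) + ↑x.length + 1).toNat = start + x.length + 1 := by omega
        have h2 : PySem.Chars.startswith (cs.drop ((start : Int) + ↑x.length + 1).toNat) ['*','*']
            = PySem.Chars.startswith y ['*','*'] := by
          rw [htn, hdrop2]
          cases rs with
          | nil => rw [pvInter_single]
          | cons z zs =>
            rw [pvInter_cons y (z :: zs) (by simp)]
            exact pvPrefix_cut ['*','*'] y _ (by decide)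
        rw [h1, h2]
      have htn : ((start : Int) + ↑x.length + 1).toNat = start + x.length + 1 := by omega
      rw [hslice, hcond, htn]
      have ihy := fun res => ih (start + x.length + 1) res (fun z hz => hnn z (List.mem_cons_of_mem _ hz)) htl hdrop2
      have hrecne := pvRecC_ne_nil (y :: rs) htl
      have hrecc : ['\n'].intercalate (pvRecC (x :: y :: rs))
      = (if PySem.Chars.startswith x ['#','#','#'] && PySem.Chars.startswith y ['*','*']
         then x ++ '\n' :: '\n' :: ['\n'].intercalate (pvRecC (y :: rs))
         else x ++ '\n' :: ['\n'].intercalate (pvRecC (y :: rs))) := by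
        simp only [pvRecC]
        by_cases hc : (PySem.Chars.startswith x ['#','#','#'] && PySem.Chars.startswith y ['*','*']) = true
        · rw [if_pos hc, if_pos hc]
          rw [show ([x, []] ++ pvRecC (y :: rs)) = x :: [] :: pvRecC (y :: rs) from rfl]
          rw [pvInter_cons x ([] :: pvRecC (y :: rs)) (by simp),
              pvInter_cons [] (pvRecC (y :: rs)) hrecne]
          rfl
        · rw [if_neg hc, if_neg hc]
          rw [show ([x] ++ pvRecC (y :: rs)) = x :: pvRecC (y :: rs) from rfl]
          rw [pvInter_cons x (pvRecC (y :: rs)) hrecne]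
      by_cases hc : (PySem.Chars.startswith x ['#','#','#'] && PySem.Chars.startswith y ['*','*']) = true
      · rw [if_pos hc, ihy (res ++ (x ++ ['\n']) ++ ['\n']), hrecc, if_pos hc]
        simp
      · rw [if_neg hc, ihy (res ++ (x ++ ['\n'])), hrecc, if_neg hc]
        simp

-- splitOn characterisation -------------------------------------------------

def pvSplit : List Char → List (List Char)
  | [] => [[]]
  | c :: rest =>
    if c = '\n' then [] :: pvSplit rest
    else
      match pvSplit rest with
      | [] => [[c]]
      | p :: ps => (c :: p) :: ps

def pvConsHead (c : List Char) : List (List Char) → List (List Char)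
  | [] => [c]
  | p :: ps => (c ++ p) :: ps

theorem pvSplit_ne_nil (s : List Char) : pvSplit s ≠ [] := by
  cases s with
  | nil => simp [pvSplit]
  | cons c rest =>
    simp only [pvSplit]
    split_ifs
    · simp
    · cases h : pvSplit rest <;> simp

theorem pvSplit_no_nl (s : List Char) : ∀ x ∈ pvSplit s, '\n' ∉ x := by
  induction s with
  | nil =>
    intro x hx
    simp only [pvSplit, List.mem_singleton] at hx
    simp [hx]
  | cons c rest ih =>
    intro x hx
    simp only [pvSplit] at hx
    split_ifs at hx with hc
    · rw [List.mem_cons] at hx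
      rcases hx with rfl | hx
      · simp
      · exact ih x hx
    · cases h : pvSplit rest with
      | nil => exact absurd h (pvSplit_ne_nil rest)
      | cons p ps =>
        rw [h] at hx
        rw [List.mem_cons] at hx
        rcases hx with rfl | hx
        · intro hm
          rw [List.mem_cons] at hm
          rcases hm with hm | hm
          · exact hc hm.symm
          · exact ih p (by rw [h]; exact List.mem_cons_self ..) hm
        · exact ih x (by rw [h]; exact List.mem_cons_of_mem _ hx)

theorem pvSplit_intercalate (s : List Char) : ['\n'].intercalate (pvSplit s) = s := by
  induction s with
  | nil => rw [pvSplit, pvInter_single]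
  | cons c rest ih =>
    simp only [pvSplit]
    split_ifs with hc
    · rw [pvInter_cons [] (pvSplit rest) (pvSplit_ne_nil rest), ih, hc]
      rfl
    · cases h : pvSplit rest with
      | nil => exact absurd h (pvSplit_ne_nil rest)
      | cons p ps =>
        rw [h] at ih
        cases ps with
        | nil =>
          rw [pvInter_single] at ih
          rw [pvInter_single, ih]
        | cons q qs =>
          rw [pvInter_cons (c :: p) (q :: qs) (by simp)]
          rw [pvInter_cons p (q :: qs) (by simp)] at ih
          rw [List.cons_append, ih]

theorem pvSplitOn_go (fuel : Nat) (l cur : List Char) (acc : List (List Char))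
    (hf : l.length < fuel) :
    PySem.Chars.splitOn.go ['\n'] fuel l cur acc
      = acc.reverse ++ pvConsHead cur.reverse (pvSplit l) := by
  induction fuel generalizing l cur acc with
  | zero => omega
  | succ f ih =>
    cases l with
    | nil =>
      simp [PySem.Chars.splitOn.go, pvSplit, pvConsHead]
    | cons c rest =>
      rw [PySem.Chars.splitOn.go]
      by_cases hc : c = '\n'
      · have hpre : List.isPrefixOf ['\n'] (c :: rest) = true := by
          simp [List.isPrefixOf, hc]
        rw [if_pos hpre]
        have : List.drop ['\n'].length (c :: rest) = rest := by simp
        rw [this, ih rest [] (cur.reverse :: acc) (by simp only [List.length_cons] at hf; omega)]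
        simp only [pvSplit, if_pos hc]
        have : pvConsHead [] (pvSplit rest) = pvSplit rest := by
          cases h : pvSplit rest with
          | nil => exact absurd h (pvSplit_ne_nil rest)
          | cons p ps => simp [pvConsHead]
        rw [show ([] : List Char).reverse = [] from rfl, this]
        simp [pvConsHead]
      · have hpre : List.isPrefixOf ['\n'] (c :: rest) = false := by
          simp [List.isPrefixOf]
          exact fun hh => absurd hh.symm hc
        rw [if_neg (by simp [hpre])]
        rw [ih rest (c :: cur) acc (by simp only [List.length_cons] at hf; omega)]
        simp only [pvSplit, if_neg hc]
        cases h : pvSplit rest with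
        | nil => exact absurd h (pvSplit_ne_nil rest)
        | cons p ps =>
          simp [pvConsHead, List.reverse_cons]
  
theorem pvSplitOn_eq (s : List Char) :
    PySem.Chars.splitOn s ['\n'] = pvSplit s := by
  rw [PySem.Chars.splitOn, pvSplitOn_go (s.length + 1) s [] [] (by omega)]
  have : pvConsHead [] (pvSplit s) = pvSplit s := by
    cases h : pvSplit s with
    | nil => exact absurd h (pvSplit_ne_nil s)
    | cons p ps => simp [pvConsHead]
  simp [this]

-- ===== VERDICT =====
theorem process_markdown_content_spec : Claim_equal_process_markdown_content := by
  intro content _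
  simp only [Spec_process_markdown_content, process_markdown_content, process_markdown_content_alt]
  set pieces := PySem.Chars.splitOn content.toList ['\n'] with hpieces
  have hsplit : (PySem.Str.split? content "\n").getD [] = pieces.map String.ofList := by
    rw [PySem.Str.split?]
    have : PySem.Chars.split? content.toList "\n".toList = some pieces := by
      rw [PySem.Chars.split?]
      simp [hpieces]
    rw [this]
    rfl
  rw [hsplit]
  set lines := pieces.map String.ofList with hlines
  have hA := pvLemA lines lines 0 [] (by simp)
  rw [show ((0 : Nat) : Int) = 0 from rfl] at hA
  rw [hA]
  have hmap : lines.map String.toList = pieces := by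
    rw [hlines, List.map_map]
    simp [Function.comp_def, String.toList_ofList]
  have hpvSplit : pieces = pvSplit content.toList := by
    rw [hpieces, pvSplitOn_eq]
  have hB : pvGo content.toList 0 [] = ['\n'].intercalate (pvRecC pieces) := by
    have h1 : content.toList.drop 0 = ['\n'].intercalate pieces := by
      rw [List.drop_zero, hpvSplit, pvSplit_intercalate]
    have h2 : ∀ x ∈ pieces, '\n' ∉ x := by
      rw [hpvSplit]; exact pvSplit_no_nl content.toList
    have h3 : pieces ≠ [] := by rw [hpvSplit]; exact pvSplit_ne_nil content.toList
    rw [pvGo_spec pieces content.toList 0 [] h2 h3 h1]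
    rfl
  rw [PySem.Str.join, hB]
  congr 1
  rw [PySem.Chars.join]
  congr 1
  rw [List.nil_append, pvRec_map lines, hmap]
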